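-- pv_equiv track=rewrite | github.com/jeremyspofford/Nova | orchestrator/app/db.py | _split_sql
-- ===== SOURCE A (Python) =====
-- def _split_sql(sql: str) -> list[str]:
--     """Split SQL text into individual statements, respecting $$ dollar-quoting.
--
--     Naive str.split(";") breaks PL/pgSQL DO blocks that contain semicolons
--     inside $$ ... $$ quoted bodies.  This splitter tracks dollar-quote regions
--     and only treats `;` as a statement separator when outside them.
--     """
--     statements: list[str] = []
--     current: list[str] = []
--     in_dollar_quote = False
--     i = 0
--     while i < len(sql):
--         if sql[i : i + 2] == "$$":
--             in_dollar_quote = not in_dollar_quote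
--             current.append("$$")
--             i += 2
--         elif sql[i] == ";" and not in_dollar_quote:
--             stmt = "".join(current).strip()
--             if stmt:
--                 statements.append(stmt)
--             current = []
--             i += 1
--         else:
--             current.append(sql[i])
--             i += 1
--     # Handle trailing statement without semicolon
--     stmt = "".join(current).strip()
--     if stmt:
--         statements.append(stmt)
--     return statements
-- ===== SOURCE B (Python) =====
-- def _split_sql(sql: str) -> list[str]:
--     """Split SQL into statements, respecting $$ dollar-quoting.
--
--     Instead of a character-by-character scan, cut the text once on "$$":
--     even-indexed pieces are outside dollar quotes (split them on ";"),
--     odd-indexed pieces are inside (kept verbatim); the "$$" delimiters are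
--     re-inserted at each piece boundary.
--     """
--     parts = sql.split("$$")
--     statements: list[str] = []
--     current: list[str] = []
--     inside = False
--     for j, part in enumerate(parts):
--         if inside:
--             current.append(part)
--         else:
--             head, *rest = part.split(";")
--             current.append(head)
--             for seg in rest:
--                 stmt = "".join(current).strip()
--                 if stmt:
--                     statements.append(stmt)
--                 current = [seg]
--         if j < len(parts) - 1:
--             current.append("$$")
--         inside = not inside
--     stmt = "".join(current).strip()
--     if stmt:
--         statements.append(stmt)
--     return statements
-- ===== Notes on version B (the rewrite author's own statement) =====
-- stated objective: faster
-- what changed: Replaces A's index-based per-character scan (two-character lookahead and toggle at each position) by one pass of str.split on the dollar-quote delimiter, whose pieces alternate outside/inside quoting: outside pieces are further split on semicolons, inside pieces are kept verbatim, and the delimiters are re-inserted at piece boundaries.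
import Mathlib
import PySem

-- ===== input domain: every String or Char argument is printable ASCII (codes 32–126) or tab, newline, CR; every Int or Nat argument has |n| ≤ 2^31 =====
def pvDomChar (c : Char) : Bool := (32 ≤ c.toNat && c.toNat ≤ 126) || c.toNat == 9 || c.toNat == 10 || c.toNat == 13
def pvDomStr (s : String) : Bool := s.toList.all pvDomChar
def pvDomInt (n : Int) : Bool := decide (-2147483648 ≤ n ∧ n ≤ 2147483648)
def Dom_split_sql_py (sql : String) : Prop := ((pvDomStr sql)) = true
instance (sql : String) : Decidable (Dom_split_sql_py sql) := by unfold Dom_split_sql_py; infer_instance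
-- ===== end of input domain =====

-- B replaces A's per-character scan with one split on the dollar-quote delimiter (pieces alternate
-- outside/inside quoting; only outside pieces are split on semicolons); measured faster by the
-- timing run (bulk work in str.split instead of a Python-level loop). Return values are equal.

-- ===== PORT A =====
-- A's while-loop over index i, as recursion over the remaining character list:
-- state = (remaining, in_dollar_quote, current, statements).
def splitSqlLoopA : List Char → Bool → List Char → List String → List String
  | [], _, cur, acc =>
      -- trailing statement without semicolon
      let stmt := PySem.Chars.strip cur
      if stmt = [] then acc else acc ++ [String.ofList stmt]
  | c :: rest, dq, cur, acc =>
      if (c :: rest).take 2 = ['$', '$'] then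
        -- sql[i:i+2] == "$$": toggle, append "$$", i += 2
        splitSqlLoopA (rest.drop 1) (!dq) (cur ++ ['$', '$']) acc
      else if c = ';' ∧ dq = false then
        -- statement separator outside dollar quotes
        let stmt := PySem.Chars.strip cur
        splitSqlLoopA rest dq [] (if stmt = [] then acc else acc ++ [String.ofList stmt])
      else
        splitSqlLoopA rest dq (cur ++ [c]) acc
  termination_by s _ _ _ => s.length
  decreasing_by all_goals simp

def split_sql_py (sql : String) : List String :=
  splitSqlLoopA sql.toList false [] []

-- ===== PORT B =====
-- B's for-loop over the pieces of sql.split("$$"); `inside` alternates, "$$" is re-inserted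
-- between consecutive pieces, outside pieces are split on ";".
def splitSqlGoB : List (List Char) → Bool → List Char → List String → List String
  | [], _, cur, acc =>
      let stmt := PySem.Chars.strip cur
      if stmt = [] then acc else acc ++ [String.ofList stmt]
  | p :: ps, inside, cur, acc =>
      let st :=
        if inside then (cur ++ p, acc)
        else
          match PySem.Chars.splitOn p [';'] with
          | [] => (cur, acc)   -- unreachable: split(";") never returns an empty list
          | head :: rest =>
              rest.foldl
                (fun t seg =>
                  (seg, let stmt := PySem.Chars.strip t.1
                        if stmt = [] then t.2 else t.2 ++ [String.ofList stmt]))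
                (cur ++ head, acc)
      splitSqlGoB ps (!inside) (st.1 ++ if ps.isEmpty then [] else ['$', '$']) st.2

def split_sql_py_alt (sql : String) : List String :=
  splitSqlGoB (PySem.Chars.splitOn sql.toList ['$', '$']) false [] []

-- ===== PRECONDITION & SPEC =====
def Spec_split_sql_py (sql : String) (out : List String) : Prop := out = split_sql_py_alt sql
instance (sql : String) (out : List String) : Decidable (Spec_split_sql_py sql out) := by unfold Spec_split_sql_py; infer_instance

-- ===== CLAIM (what is proved, stated in full; the proofs are below) =====
def Claim_equal_split_sql_py : Prop := ∀ (sql : String), Dom_split_sql_py sql → Spec_split_sql_py sql (split_sql_py sql)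

-- ===== LEMMAS AND PROOFS =====

-- Fuel-free leftmost splitter used only to reason about PySem.Chars.splitOn.
def pvSplit (sep : List Char) : List Char → List (List Char)
  | [] => [[]]
  | c :: rest =>
      if sep.isPrefixOf (c :: rest) then
        [] :: pvSplit sep (rest.drop (sep.length - 1))
      else
        (pvSplit sep rest).modifyHead (c :: ·)
  termination_by s => s.length
  decreasing_by all_goals simp

-- the emit step shared in spirit by both programs ("join, strip, append if non-empty")
def pvEmit (cur : List Char) (acc : List String) : List String :=
  if PySem.Chars.strip cur = [] then acc else acc ++ [String.ofList (PySem.Chars.strip cur)]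

theorem pvSplit_ne_nil (sep s : List Char) : pvSplit sep s ≠ [] := by
  fun_induction pvSplit sep s with
  | case1 => simp
  | case2 => simp
  | case3 _ _ _ ih => simpa [List.modifyHead_eq_nil_iff] using ih

theorem isPrefixOf_iff_take (sep l : List Char) : sep.isPrefixOf l = true ↔ l.take sep.length = sep := by
  rw [List.isPrefixOf_iff_prefix]
  constructor
  · intro h; exact (List.prefix_iff_eq_take.mp h).symm
  · intro h; exact List.prefix_iff_eq_take.mpr h.symm

theorem go_eq_pvSplit (sep : List Char) (hsep : sep ≠ []) :
    ∀ (fuel : Nat) (l cur : List Char) (acc : List (List Char)), l.length < fuel →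
      PySem.Chars.splitOn.go sep fuel l cur acc
        = acc.reverse ++ (pvSplit sep l).modifyHead (cur.reverse ++ ·) := by
  intro fuel
  induction fuel with
  | zero => intro l cur acc h; omega
  | succ fuel ih =>
    intro l cur acc h
    match l with
    | [] => simp [PySem.Chars.splitOn.go, pvSplit]
    | c :: rest =>
      rw [show PySem.Chars.splitOn.go sep (fuel+1) (c::rest) cur acc =
          (if sep.isPrefixOf (c::rest) then
            PySem.Chars.splitOn.go sep fuel (List.drop sep.length (c::rest)) [] (cur.reverse :: acc)
          else PySem.Chars.splitOn.go sep fuel rest (c :: cur) acc) from by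
        simp only [PySem.Chars.splitOn.go]]
      by_cases hp : sep.isPrefixOf (c :: rest) = true
      · rw [if_pos hp]
        have hd : List.drop sep.length (c :: rest) = rest.drop (sep.length - 1) := by
          match sep, hsep with
          | s₀ :: sep', _ => simp
        rw [hd, ih _ _ _ (by simp at h ⊢; omega)]
        rw [pvSplit, if_pos hp]
        simp
        cases pvSplit sep (List.drop (sep.length - 1) rest) <;> simp
      · rw [if_neg hp, ih _ _ _ (by simp at h ⊢; omega)]
        rw [pvSplit, if_neg hp]
        rcases List.ne_nil_iff_exists_cons.mp (pvSplit_ne_nil sep rest) with ⟨p, ps, hps⟩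
        simp [hps]

theorem splitOn_eq_pvSplit (sep s : List Char) (h : sep ≠ []) :
    PySem.Chars.splitOn s sep = pvSplit sep s := by
  rw [PySem.Chars.splitOn, go_eq_pvSplit sep h (s.length + 1) s [] [] (by omega)]
  rcases List.ne_nil_iff_exists_cons.mp (pvSplit_ne_nil sep s) with ⟨p, ps, hps⟩
  simp [hps]

-- pvSplit on the concrete separators, restated as rewriting equations
theorem pvSplit_dollar_cons (rest : List Char) :
    pvSplit ['$','$'] ('$' :: '$' :: rest) = [] :: pvSplit ['$','$'] rest := by
  rw [pvSplit]; simp [List.isPrefixOf]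

theorem pvSplit_dollar_other (c : Char) (rest : List Char)
    (h : ¬ (c :: rest).take 2 = ['$','$']) :
    pvSplit ['$','$'] (c :: rest) = (pvSplit ['$','$'] rest).modifyHead (c :: ·) := by
  rw [pvSplit, if_neg]
  intro hp
  exact h ((isPrefixOf_iff_take _ _).mp hp)

theorem pvSplit_semi_cons (rest : List Char) :
    pvSplit [';'] (';' :: rest) = [] :: pvSplit [';'] rest := by
  rw [pvSplit]; simp [List.isPrefixOf]

theorem pvSplit_semi_other (c : Char) (rest : List Char) (h : c ≠ ';') :
    pvSplit [';'] (c :: rest) = (pvSplit [';'] rest).modifyHead (c :: ·) := by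
  rw [pvSplit, if_neg]
  intro hp
  rcases (isPrefixOf_iff_take _ _).mp hp with h'
  simp at h'
  exact h h'

-- pushing one character of an outside piece into the buffer
theorem goB_cons_char (c : Char) (p : List Char) (ps : List (List Char)) (dq : Bool)
    (cur : List Char) (acc : List String) (h : dq = true ∨ c ≠ ';') :
    splitSqlGoB ((c :: p) :: ps) dq cur acc = splitSqlGoB (p :: ps) dq (cur ++ [c]) acc := by
  cases dq with
  | true => simp [splitSqlGoB]
  | false =>
    have hc : c ≠ ';' := by tauto
    rw [splitSqlGoB, splitSqlGoB]
    rw [splitOn_eq_pvSplit _ _ (by decide), splitOn_eq_pvSplit _ _ (by decide),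
        pvSplit_semi_other c p hc]
    rcases List.ne_nil_iff_exists_cons.mp (pvSplit_ne_nil [';'] p) with ⟨q, qs, hq⟩
    simp [hq]

-- a separating semicolon: emit the buffer
theorem goB_cons_semi (p : List Char) (ps : List (List Char)) (cur : List Char)
    (acc : List String) :
    splitSqlGoB ((';' :: p) :: ps) false cur acc
      = splitSqlGoB (p :: ps) false [] (pvEmit cur acc) := by
  rw [splitSqlGoB, splitSqlGoB]
  rw [splitOn_eq_pvSplit _ _ (by decide), splitOn_eq_pvSplit _ _ (by decide),
      pvSplit_semi_cons]
  rcases List.ne_nil_iff_exists_cons.mp (pvSplit_ne_nil [';'] p) with ⟨q, qs, hq⟩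
  simp [hq, pvEmit]

theorem goB_nil_piece (ps : List (List Char)) (dq : Bool) (cur : List Char) (acc : List String) :
    splitSqlGoB ([] :: ps) dq cur acc
      = splitSqlGoB ps (!dq) (cur ++ if ps.isEmpty then [] else ['$','$']) acc := by
  cases dq <;>
    simp [splitSqlGoB, show PySem.Chars.splitOn [] [';'] = [[]] from rfl]

theorem main_loop_eq (s : List Char) (dq : Bool) (cur : List Char) (acc : List String) :
    splitSqlLoopA s dq cur acc = splitSqlGoB (pvSplit ['$','$'] s) dq cur acc := by
  fun_induction splitSqlLoopA s dq cur acc with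
  | case1 dq cur acc stmt hst =>
    replace hst : PySem.Chars.strip cur = [] := hst
    rw [pvSplit, goB_nil_piece]
    simp [splitSqlGoB, hst]
  | case2 dq cur acc stmt hst =>
    replace hst : ¬ PySem.Chars.strip cur = [] := hst
    rw [pvSplit, goB_nil_piece]
    simp [splitSqlGoB, hst]
    rfl
  | case3 c rest dq cur acc htake ih =>
    -- the "$$" branch: s = '$' :: '$' :: rs
    have hc : c = '$' := by
      have := congrArg List.head? htake; simpa using this
    obtain ⟨rs, hrs⟩ : ∃ rs, rest = '$' :: rs := by
      cases rest with
      | nil => rw [hc] at htake; simp at htake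
      | cons r rs' =>
        refine ⟨rs', ?_⟩
        simp [List.take] at htake
        rw [htake.2]
    subst hc; subst hrs
    rw [pvSplit_dollar_cons, goB_nil_piece]
    have hne : (pvSplit ['$','$'] rs).isEmpty = false := by
      simpa [List.isEmpty_iff] using pvSplit_ne_nil ['$','$'] rs
    rw [hne]
    simpa using ih
  | case4 c rest dq cur acc htake hsemi stmt ih =>
    -- a separating ';' outside dollar quotes
    obtain ⟨hc, hdq⟩ := hsemi
    subst hc; subst hdq
    rw [pvSplit_dollar_other _ _ htake]
    obtain ⟨q, qs, hq⟩ := List.ne_nil_iff_exists_cons.mp (pvSplit_ne_nil ['$','$'] rest)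
    rw [hq, List.modifyHead_cons, goB_cons_semi, ← hq]
    exact ih
  | case5 c rest dq cur acc htake hns ih =>
    rw [pvSplit_dollar_other _ _ htake]
    obtain ⟨q, qs, hq⟩ := List.ne_nil_iff_exists_cons.mp (pvSplit_ne_nil ['$','$'] rest)
    rw [hq, List.modifyHead_cons, goB_cons_char _ _ _ _ _ _ (by cases dq <;> simp_all), ← hq]
    exact ih

-- ===== VERDICT (by name: the statement is the Claim_ definition above) =====
theorem split_sql_py_spec : Claim_equal_split_sql_py := by
  intro sql _
  unfold Spec_split_sql_py split_sql_py split_sql_py_alt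
  rw [splitOn_eq_pvSplit _ _ (by decide)]
  exact main_loop_eq sql.toList false [] []
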